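-- pv_equiv track=rewrite | github.com/bhavyasree627/-M1-Cont005-Arrays--Vectors | Sorting/custom_sort.py | custom_sort
-- ===== SOURCE A (Python) =====
-- import heapq
--
-- def custom_sort(N, M, nums):
--     count_dict = {}
--     for num in nums:
--         count_dict[num] = count_dict.get(num, 0) + 1
--     min_heap = []
--     for num, count in count_dict.items():
--         heapq.heappush(min_heap, (-count, num))
--     result = []
--     while min_heap:
--         count, num = heapq.heappop(min_heap)
--         count = -count
--         result.extend([num] * count)
--     return result
-- ===== SOURCE B (Python) =====
-- def custom_sort(N, M, nums):
--     count_dict = {}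
--     for num in nums:
--         count_dict[num] = count_dict.get(num, 0) + 1
--     result = []
--     for num, count in sorted(count_dict.items(), key=lambda x: (-x[1], x[0])):
--         result.extend([num] * count)
--     return result
-- ===== Notes on version B (the rewrite author's own statement) =====
-- stated objective: idiomatic
-- what changed: Replaces the heap (heappush every unique value, then a drain loop of heappops) with one library sorted() over the count-dict items using key (-count, value), followed by a single emit loop.
import Mathlib
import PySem

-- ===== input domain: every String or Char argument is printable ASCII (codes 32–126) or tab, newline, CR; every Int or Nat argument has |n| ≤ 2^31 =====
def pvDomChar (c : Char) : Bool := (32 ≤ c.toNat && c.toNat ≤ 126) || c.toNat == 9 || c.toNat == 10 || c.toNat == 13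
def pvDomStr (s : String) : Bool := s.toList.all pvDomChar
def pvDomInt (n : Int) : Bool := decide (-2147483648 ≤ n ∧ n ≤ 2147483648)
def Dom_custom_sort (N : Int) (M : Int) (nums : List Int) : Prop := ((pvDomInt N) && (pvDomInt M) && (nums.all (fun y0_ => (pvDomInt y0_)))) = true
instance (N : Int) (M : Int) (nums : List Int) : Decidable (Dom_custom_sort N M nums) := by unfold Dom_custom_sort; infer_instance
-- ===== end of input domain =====

-- B replaces A's heap (heappush of (-count, num) per unique value, then a pop-drain loop) with
-- one sorted() call over the count-dict items keyed by (-count, value) and a single emit loop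
-- (objective: idiomatic). Return values only; neither version mutates its arguments.

-- ===== PORT A =====
-- Python's tuple comparison for the heap entries (-count, num): lexicographic order on Int × Int.
def csLex (p : Int × Int) : Lex (Int × Int) := toLex p

-- heapq modelled by its observable behaviour: heappush collects the entries, heappop returns
-- (and removes) the least entry under Python's tuple order. Exact here: heapq.heappop always
-- returns a minimal entry, and the entries are pairwise distinct (one per distinct dict key).
def csDrain (heap : List (Int × Int)) (result : List Int) : List Int :=
  match hm : PySem.List.min? heap csLex with
  | none => result
  | some m => csDrain (heap.erase m) (result ++ List.replicate (-m.1).toNat m.2)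
  termination_by heap.length
  decreasing_by
    have hmem : m ∈ heap := PySem.List.min?_mem hm
    have h1 := List.length_erase_of_mem hmem
    have h2 := List.length_pos_of_mem hmem
    omega

def custom_sort (N : Int) (M : Int) (nums : List Int) : List Int :=
  let count_dict := nums.foldl (fun d num => d.insert num (d.getD num 0 + 1)) PySem.Dict.empty
  let min_heap := count_dict.items.foldl (fun h p => h ++ [(-p.2, p.1)]) ([] : List (Int × Int))
  csDrain min_heap []

-- ===== PORT B =====
def custom_sort_alt (N : Int) (M : Int) (nums : List Int) : List Int :=
  let count_dict := nums.foldl (fun d num => d.insert num (d.getD num 0 + 1)) PySem.Dict.empty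
  (PySem.List.sorted2 count_dict.items (fun x => -x.2) (fun x => x.1)).foldl
    (fun result p => result ++ List.replicate p.2.toNat p.1) []

-- ===== PRECONDITION & SPEC =====
def Spec_custom_sort (N : Int) (M : Int) (nums : List Int) (out : List Int) : Prop := out = custom_sort_alt N M nums
instance (N : Int) (M : Int) (nums : List Int) (out : List Int) : Decidable (Spec_custom_sort N M nums out) := by unfold Spec_custom_sort; infer_instance

-- ===== CLAIM (what is proved, stated in full; the proofs are below) =====
def Claim_equal_custom_sort : Prop := ∀ (N : Int) (M : Int) (nums : List Int), Dom_custom_sort N M nums → Spec_custom_sort N M nums (custom_sort N M nums)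

-- ===== LEMMAS AND PROOFS =====

theorem csLex_injective : Function.Injective csLex := fun _ _ h => toLex.injective h

def csPair (p : Int × Int) : Int × Int := (-p.2, p.1)

theorem csPair_injective : Function.Injective csPair := by
  intro a b h
  have h1 := congrArg Prod.fst h
  have h2 := congrArg Prod.snd h
  simp [csPair] at h1 h2
  exact Prod.ext h2 (by omega)

-- B's sorted2 with keys (-count, num) is sorting by the single lexicographic key csLex ∘ csPair.
theorem sorted2_eq_sorted_lex (xs : List (Int × Int)) :
    PySem.List.sorted2 xs (fun p => -p.2) (fun p => p.1) =
    PySem.List.sorted xs (fun p => csLex (csPair p)) := by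
  unfold PySem.List.sorted2 PySem.List.sorted
  have hb : (fun (a b : Int × Int) => decide ((fun p : Int × Int => -p.2) a < (fun p : Int × Int => -p.2) b) || !decide ((fun p : Int × Int => -p.2) b < (fun p : Int × Int => -p.2) a) && decide ((fun p : Int × Int => p.1) a < (fun p : Int × Int => p.1) b))
      = (fun (a b : Int × Int) => decide ((fun p => csLex (csPair p)) a < (fun p => csLex (csPair p)) b)) := by
    funext a b
    simp only [csLex, csPair, Prod.Lex.toLex_lt_toLex]
    by_cases h1 : -a.2 < -b.2 <;> by_cases h2 : -a.2 = -b.2 <;> by_cases h3 : a.1 < b.1 <;>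
      simp [h1, h2, h3] <;> omega
  simp only [hb]
  simp

theorem nodup_items_counter (nums : List Int) :
    (PySem.Dict.counter nums).items.Nodup := by
  rw [PySem.Dict.items_counter]
  exact (PySem.Set.nodup_ofList nums).map (fun a b h => congrArg Prod.fst h)

theorem sorted_eq_min_cons (h : List (Int × Int)) (hnd : h.Nodup) (m : Int × Int)
    (hm : PySem.List.min? h csLex = some m) :
    PySem.List.sorted h csLex = m :: PySem.List.sorted (h.erase m) csLex := by
  have hmem : m ∈ h := PySem.List.min?_mem hm
  apply PySem.List.sorted_eq_of_perm_of_pairwise_lt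
  · exact ((PySem.List.sorted_perm (h.erase m) csLex false).cons m).trans
      (List.perm_cons_erase hmem).symm
  · rw [List.pairwise_cons]
    constructor
    · intro y hy
      have hy' : y ∈ h.erase m := (PySem.List.mem_sorted _ _ _ _).1 hy
      have hle : csLex m ≤ csLex y := PySem.List.min?_isMin hm y (List.mem_of_mem_erase hy')
      have hne : m ≠ y := fun e => (hnd.not_mem_erase (e ▸ hy'))
      exact lt_of_le_of_ne hle (fun e => hne (csLex_injective e))
    · have hp := PySem.List.sorted_pairwise (h.erase m) csLex
      have hnd' : (PySem.List.sorted (h.erase m) csLex).Nodup :=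
        ((PySem.List.sorted_perm (h.erase m) csLex false).nodup_iff).2 (hnd.erase m)
      exact (hp.and hnd').imp (fun {a b} ⟨hle, hne⟩ =>
        lt_of_le_of_ne hle (fun e => hne (csLex_injective e)))

-- A's heap drain is the emit loop over the lexicographically sorted heap entries.
theorem csDrain_eq (n : Nat) (h : List (Int × Int)) (hn : h.length = n) (hnd : h.Nodup) (acc : List Int) :
    csDrain h acc =
      acc ++ (PySem.List.sorted h csLex).flatMap (fun m => List.replicate (-m.1).toNat m.2) := by
  induction n generalizing h acc with
  | zero =>
    have : h = [] := List.eq_nil_of_length_eq_zero hn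
    subst this
    simp [csDrain, PySem.List.min?, PySem.List.sorted]
  | succ k ih =>
    rw [csDrain]
    cases hm : PySem.List.min? h csLex with
    | none =>
      exact absurd ((PySem.List.min?_eq_none_iff _ _).1 hm) (by intro e; subst e; simp at hn)
    | some m =>
      have hmem : m ∈ h := PySem.List.min?_mem hm
      dsimp only
      rw [sorted_eq_min_cons h hnd m hm, List.flatMap_cons]
      rw [ih (h.erase m) (by have := List.length_erase_of_mem hmem; omega) (hnd.erase m)]
      simp

-- sorting the pushed entries (xs mapped through csPair) is mapping the key-sorted xs.
theorem sorted_map_csPair (xs : List (Int × Int)) (hnd : xs.Nodup) :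
    PySem.List.sorted (xs.map csPair) csLex =
      (PySem.List.sorted xs (fun p => csLex (csPair p))).map csPair := by
  apply PySem.List.sorted_eq_of_perm_of_pairwise_lt
  · exact (PySem.List.sorted_perm xs (fun p => csLex (csPair p)) false).map csPair
  · rw [List.pairwise_map]
    have hp := PySem.List.sorted_pairwise xs (fun p => csLex (csPair p))
    have hnd' : (PySem.List.sorted xs (fun p => csLex (csPair p))).Nodup :=
      ((PySem.List.sorted_perm xs (fun p => csLex (csPair p)) false).nodup_iff).2 hnd
    exact (hp.and hnd').imp (fun {a b} ⟨hle, hne⟩ =>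
      lt_of_le_of_ne hle (fun e => hne (csPair_injective (csLex_injective e))))

-- ===== VERDICT (by name: the statement is the Claim_ definition above) =====
theorem custom_sort_spec : Claim_equal_custom_sort := by
  intro N M nums _
  unfold Spec_custom_sort custom_sort custom_sort_alt
  dsimp only
  rw [PySem.Dict.foldl_insert_getD_add_one_eq_counter]
  have hnd := nodup_items_counter nums
  rw [show (fun (h : List (Int × Int)) (p : Int × Int) => h ++ [(-p.2, p.1)])
        = (fun h p => h ++ [csPair p]) from rfl]
  rw [PySem.List.foldl_append_singleton_eq_map (f := csPair), List.nil_append]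
  rw [PySem.List.foldl_append_eq_flatMap (g := fun p : Int × Int => List.replicate p.2.toNat p.1),
      List.nil_append]
  rw [sorted2_eq_sorted_lex]
  rw [csDrain_eq _ _ rfl (hnd.map csPair_injective), List.nil_append]
  rw [sorted_map_csPair _ hnd, List.flatMap_map]
  apply List.flatMap_congr
  intro x _
  simp [csPair]
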